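-- pv_equiv track=rewrite | github.com/SHAIMOOM251283/Grokking-Algorithms | 08. GREEDY ALGORITHMS/jonah_approximation_algorithm.py | select_players
-- ===== SOURCE A (Python) =====
-- def select_players(players, abilities, team_size):
--     selected_team = []
--     uncovered_abilities = set(abilities)
--
--     while len(selected_team) < team_size and uncovered_abilities:
--         best_player = max(players, key=lambda p: len(p['abilities'].intersection(uncovered_abilities)))
--         selected_team.append(best_player)
--         uncovered_abilities -= best_player['abilities']
--
--     return selected_team
-- ===== SOURCE B (Python) =====
-- def select_players(players, abilities, team_size):
--     # Inverted index + incrementally maintained cover counts: each round picks the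
--     # strict-max count in player order (= Python max tie-breaking) and decrements
--     # counts only for the abilities actually removed from the uncovered set.
--     uncovered = set(abilities)
--     team = []
--     if team_size > 0 and uncovered:
--         sets = [p['abilities'] for p in players]
--         index = {}
--         count = [0] * len(players)
--         for i, s in enumerate(sets):
--             for a in s:
--                 if a in uncovered:
--                     index.setdefault(a, []).append(i)
--                     count[i] += 1
--         while len(team) < team_size and uncovered:
--             best = 0
--             for i, c in enumerate(count):
--                 if c > count[best]:
--                     best = i
--             team.append(players[best])
--             for a in sets[best]:
--                 if a in uncovered:
--                     uncovered.discard(a)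
--                     for i in index[a]:
--                         count[i] -= 1
--     return team
-- ===== Notes on version B (the rewrite author's own statement) =====
-- stated objective: faster
-- what changed: Replaces the per-round recomputation of every player's intersection with the uncovered set by a precomputed inverted ability-to-players index plus incrementally maintained cover counts, decremented only for abilities actually removed; the pick is a strict-max index scan (same tie-breaking as max).
import Mathlib
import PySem

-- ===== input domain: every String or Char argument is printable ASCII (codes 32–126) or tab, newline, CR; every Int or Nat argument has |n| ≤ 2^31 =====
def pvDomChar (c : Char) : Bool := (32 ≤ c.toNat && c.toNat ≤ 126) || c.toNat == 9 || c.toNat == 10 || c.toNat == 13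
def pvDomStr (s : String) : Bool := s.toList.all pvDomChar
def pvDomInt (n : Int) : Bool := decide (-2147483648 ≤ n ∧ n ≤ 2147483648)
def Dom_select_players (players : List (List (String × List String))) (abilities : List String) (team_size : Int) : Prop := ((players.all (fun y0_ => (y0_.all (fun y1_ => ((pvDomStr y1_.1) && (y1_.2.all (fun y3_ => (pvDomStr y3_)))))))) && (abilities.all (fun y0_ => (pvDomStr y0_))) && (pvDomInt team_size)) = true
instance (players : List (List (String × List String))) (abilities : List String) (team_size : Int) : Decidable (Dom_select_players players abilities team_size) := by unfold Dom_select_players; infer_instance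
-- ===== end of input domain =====

-- B replaces A's per-round recomputation of every player's intersection with the uncovered
-- set by a precomputed inverted ability→players index plus incrementally maintained cover
-- counts (objective: faster).

-- ===== PORT A =====
-- shared accessor: p['abilities'] read as a Python set (distinct elements)
def pvAbil (p : List (String × List String)) : List String :=
  PySem.Set.ofList (PySem.Dict.getD (PySem.Dict.mk p) "abilities" [])

-- len(p['abilities'].intersection(uncovered))
def pvAKey (u : List String) (p : List (String × List String)) : Nat :=
  (PySem.Set.inter (pvAbil p) u).length

-- max(players, key=…): first element with the strictly largest key
def pvAMax (players : List (List (String × List String))) (u : List String) :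
    List (String × List String) :=
  match players with
  | [] => []   -- Python: ValueError; excluded by Pre_
  | p :: ps => ps.foldl (fun best q => if pvAKey u q > pvAKey u best then q else best) p

-- the while loop; fuel = team_size - len(selected_team)
def pvALoop (players : List (List (String × List String))) :
    Nat → List String → List (List (String × List String))
  | 0, _ => []
  | n + 1, u =>
    if u.isEmpty then []
    else
      let best := pvAMax players u
      best :: pvALoop players n (PySem.Set.diff u (pvAbil best))

def select_players (players : List (List (String × List String))) (abilities : List String) (team_size : Int) : List (List (String × List String)) :=
  pvALoop players team_size.toNat (PySem.Set.ofList abilities)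

-- ===== PORT B =====
-- build the inverted index ability → player indices and the initial cover counts
def pvBuild (sets : List (List String)) (u0 : List String) :
    PySem.Dict String (List Int) × List Int :=
  (PySem.List.enumerate sets 0).foldl
    (fun st is =>
      is.2.foldl
        (fun st a =>
          if a ∈ u0 then
            (st.1.modify a [] (fun l => l ++ [is.1]),
             st.2.set is.1.toNat (st.2.getD is.1.toNat 0 + 1))
          else st)
        st)
    (PySem.Dict.empty, List.replicate sets.length 0)

-- strict-max scan over the counts (first index wins ties, like Python's max)
def pvArgmax (counts : List Int) : Nat :=
  (PySem.List.enumerate counts 0).foldl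
    (fun best ic => if ic.2 > counts.getD best 0 then ic.1.toNat else best) 0

-- remove the chosen player's still-uncovered abilities, decrementing counts via the index
def pvRemove (index : PySem.Dict String (List Int)) (s : List String)
    (st : List String × List Int) : List String × List Int :=
  s.foldl
    (fun st a =>
      if a ∈ st.1 then
        (PySem.Set.discard st.1 a,
         (index.getD a []).foldl (fun cs i => cs.set i.toNat (cs.getD i.toNat 0 - 1)) st.2)
      else st)
    st

def pvBLoop (players : List (List (String × List String))) (sets : List (List String))
    (index : PySem.Dict String (List Int)) :
    Nat → List String → List Int → List (List (String × List String))
  | 0, _, _ => []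
  | n + 1, u, counts =>
    if u.isEmpty then []
    else
      let best := pvArgmax counts
      let st := pvRemove index (sets.getD best []) (u, counts)
      players.getD best [] :: pvBLoop players sets index n st.1 st.2

def select_players_alt (players : List (List (String × List String))) (abilities : List String) (team_size : Int) : List (List (String × List String)) :=
  let u0 := PySem.Set.ofList abilities
  if 0 < team_size ∧ u0 ≠ [] then
    let sets := players.map pvAbil
    let ic := pvBuild sets u0
    pvBLoop players sets ic.1 team_size.toNat u0 ic.2
  else []

-- ===== PRECONDITION & SPEC =====
-- Pre_ excludes exactly the inputs where A raises: when the loop runs (team_size > 0 and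
-- abilities nonempty) Python's max raises ValueError on an empty player list and the key
-- lambda raises KeyError on a player without an 'abilities' entry.
def Pre_select_players (players : List (List (String × List String))) (abilities : List String) (team_size : Int) : Prop :=
  team_size ≤ 0 ∨ abilities = [] ∨
    (players ≠ [] ∧ ∀ p ∈ players, ((PySem.Dict.mk p).get? "abilities").isSome = true)
instance (players : List (List (String × List String))) (abilities : List String) (team_size : Int) : Decidable (Pre_select_players players abilities team_size) := by unfold Pre_select_players; infer_instance

def pvWitness_select_players : (List (List (String × List String))) × List String × Int :=
  ([[("abilities", ["a", "b"])], [("abilities", ["c"])]], ["a", "c"], 2)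

def Spec_select_players (players : List (List (String × List String))) (abilities : List String) (team_size : Int) (out : List (List (String × List String))) : Prop := out = select_players_alt players abilities team_size
instance (players : List (List (String × List String))) (abilities : List String) (team_size : Int) (out : List (List (String × List String))) : Decidable (Spec_select_players players abilities team_size out) := by unfold Spec_select_players; infer_instance

-- ===== CLAIM (what is proved, stated in full; the proofs are below) =====
def Claim_equal_select_players : Prop := ∀ (players : List (List (String × List String))) (abilities : List String) (team_size : Int), Dom_select_players players abilities team_size → Pre_select_players players abilities team_size → Spec_select_players players abilities team_size (select_players players abilities team_size)

-- ===== LEMMAS AND PROOFS =====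

-- enumerate as a map over List.range (any default: the index stays in range)
theorem pv_enum_eq {α : Type} (d : α) : ∀ (l : List α) (s : Int),
    PySem.List.enumerate l s
      = (List.range l.length).map (fun (k : Nat) => ((s + (k : Int)), l.getD k d)) := by
  
  intro l
  induction l with
  | nil => intro s; rfl
  | cons x t ih =>
    intro s
    rw [show PySem.List.enumerate (x :: t) s = (s, x) :: PySem.List.enumerate t (s + 1) from rfl]
    rw [ih (s + 1)]
    simp only [List.length_cons]
    rw [List.range_succ_eq_map, List.map_cons, List.map_map]
    refine congrArg₂ List.cons (by simp) ?_
    apply List.map_congr_left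
    intro k _
    simp [Function.comp, List.getD_cons_succ]
    push_cast
    ring

-- getD through map, in-range
theorem pv_getD_map {α β : Type} (f : α → β) (l : List α) (j : Nat) (hj : j < l.length)
    (d : α) (d' : β) : (l.map f).getD j d' = f (l.getD j d) := by
  have h : l[j]? = some l[j] := List.getElem?_eq_getElem hj
  rw [List.getD_eq_getElem?_getD, List.getD_eq_getElem?_getD, List.getElem?_map, h]
  rfl

theorem pv_foldl_eq_range {α β : Type} (d : α) : ∀ (l : List α) (f : β → α → β) (b : β),
    l.foldl f b = (List.range l.length).foldl (fun acc k => f acc (l.getD k d)) b := by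
  
  intro l
  induction l with
  | nil => intro f b; rfl
  | cons x t ih =>
    intro f b
    rw [List.foldl_cons, ih]
    simp only [List.length_cons]
    rw [List.range_succ_eq_map, List.foldl_cons, List.foldl_map]
    simp [List.getD_cons_succ]

-- strict-max index scan vs Python max over the players, given pointwise counts
theorem pv_argmax_core (u : List String) (full : List (List (String × List String)))
    (counts : List Int) (hne : full ≠ []) (hlen : counts.length = full.length)
    (hc : ∀ k, k < full.length → counts.getD k 0 = (pvAKey u (full.getD k []) : Int)) :
    ∀ n, n ≤ full.length →
      ((List.range n).foldl (fun b k => if counts.getD k 0 > counts.getD b 0 then k else b) 0)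
          < full.length ∧
      full.getD ((List.range n).foldl
          (fun b k => if counts.getD k 0 > counts.getD b 0 then k else b) 0) []
        = (List.range n).foldl
            (fun acc k => if pvAKey u (full.getD k []) > pvAKey u acc then full.getD k [] else acc)
            (full.getD 0 []) := by
  
  intro n
  induction n with
  | zero =>
    intro _
    exact ⟨List.length_pos_iff.mpr hne, rfl⟩
  | succ n ihn =>
    intro hn
    have hn' : n ≤ full.length := Nat.le_of_succ_le hn
    have hnlt : n < full.length := hn
    obtain ⟨hr, ha⟩ := ihn hn'
    rw [List.range_succ, List.foldl_append, List.foldl_append]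
    simp only [List.foldl_cons, List.foldl_nil]
    rw [hc n hnlt, hc _ hr, ha]
    by_cases hgt : pvAKey u (full.getD n []) > pvAKey u ((List.range n).foldl
        (fun acc k => if pvAKey u (full.getD k []) > pvAKey u acc then full.getD k [] else acc)
        (full.getD 0 []))
    · rw [if_pos (by exact_mod_cast hgt), if_pos hgt]
      exact ⟨hnlt, rfl⟩
    · rw [if_neg (by exact_mod_cast hgt), if_neg hgt]
      exact ⟨hr, ha⟩

theorem pv_argmax_spec (u : List String) (full : List (List (String × List String)))
    (counts : List Int) (hne : full ≠ []) (hlen : counts.length = full.length)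
    (hc : ∀ k, k < full.length → counts.getD k 0 = (pvAKey u (full.getD k []) : Int)) :
    pvArgmax counts < full.length ∧ full.getD (pvArgmax counts) [] = pvAMax full u := by
  
  have hcore := pv_argmax_core u full counts hne hlen hc full.length le_rfl
  have hB : pvArgmax counts = (List.range full.length).foldl
      (fun b k => if counts.getD k 0 > counts.getD b 0 then k else b) 0 := by
    unfold pvArgmax
    rw [pv_enum_eq (0 : Int) counts 0, List.foldl_map, hlen]
    simp only [zero_add, Int.toNat_natCast]
  have hA : pvAMax full u = (List.range full.length).foldl
      (fun acc k => if pvAKey u (full.getD k []) > pvAKey u acc then full.getD k [] else acc)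
      (full.getD 0 []) := by
    cases full with
    | nil => exact absurd rfl hne
    | cons p ps =>
      simp only [List.length_cons]
      rw [List.range_succ_eq_map, List.foldl_cons, List.foldl_map]
      simp only [List.getD_cons_zero, List.getD_cons_succ, gt_iff_lt, lt_irrefl, if_neg,
        Nat.succ_eq_add_one]
      rw [show pvAMax (p :: ps) u
          = ps.foldl (fun best q => if pvAKey u q > pvAKey u best then q else best) p from rfl]
      rw [pv_foldl_eq_range ([] : List (String × List String)) ps]
      simp [gt_iff_lt]
  rw [hB, hA]
  exact hcore

-- membership in the uncovered list with one element discarded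
theorem pv_contains_discard (a y : String) (u : List String) :
    ((u.filter (fun z => !(z == a))).contains y) = (u.contains y && !(y == a)) := by
  by_cases h1 : y ∈ u <;> by_cases h2 : y = a <;> simp [h1, h2]

-- getD through List.set
theorem pv_getD_set (cs : List Int) (m : Nat) (v : Int) (j : Nat) :
    (cs.set m v).getD j 0 = if j = m ∧ m < cs.length then v else cs.getD j 0 := by
  rw [List.getD_eq_getElem?_getD, List.getElem?_set, List.getD_eq_getElem?_getD]
  by_cases hmj : m = j
  · subst hmj
    by_cases hm : m < cs.length <;> simp [hm]
  · have : ¬(j = m ∧ m < cs.length) := fun h => hmj h.1.symm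
    simp [hmj, this]

-- one player's pass over its abilities during the build
theorem pv_build_inner (u0 : List String) (k : Nat) :
    ∀ (s : List String) (d : PySem.Dict String (List Int)) (cs : List Int),
    s.Nodup →
    ((s.foldl (fun st a =>
        if a ∈ u0 then
          (st.1.modify a [] (fun l => l ++ [(k : Int)]), st.2.set k (st.2.getD k 0 + 1))
        else st) (d, cs)).2.length = cs.length) ∧
    (∀ j, (s.foldl (fun st a =>
        if a ∈ u0 then
          (st.1.modify a [] (fun l => l ++ [(k : Int)]), st.2.set k (st.2.getD k 0 + 1))
        else st) (d, cs)).2.getD j 0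
      = cs.getD j 0 + if j = k ∧ k < cs.length
          then ((s.filter (fun a => u0.contains a)).length : Int) else 0) ∧
    (∀ a (x : Int), ((s.foldl (fun st a =>
        if a ∈ u0 then
          (st.1.modify a [] (fun l => l ++ [(k : Int)]), st.2.set k (st.2.getD k 0 + 1))
        else st) (d, cs)).1.getD a []).count x
      = ((d.getD a []).count x) + if x = (k : Int) ∧ a ∈ s ∧ a ∈ u0 then 1 else 0) ∧
    (∀ a (x : Int), x ∈ ((s.foldl (fun st a =>
        if a ∈ u0 then
          (st.1.modify a [] (fun l => l ++ [(k : Int)]), st.2.set k (st.2.getD k 0 + 1))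
        else st) (d, cs)).1.getD a []) → x ∈ d.getD a [] ∨ 0 ≤ x) := by
  
  intro s
  induction s with
  | nil =>
    intro d cs _
    exact ⟨rfl, by intro j; simp, by intro a x; simp, fun a x hx => Or.inl hx⟩
  | cons a0 rest ih =>
    intro d cs hnd
    obtain ⟨ha0, hndr⟩ := List.nodup_cons.mp hnd
    rw [List.foldl_cons]
    by_cases hmem : a0 ∈ u0
    · rw [if_pos hmem]
      obtain ⟨IH1, IH2, IH3, IH4⟩ :=
        ih (d.modify a0 [] (fun l => l ++ [(k : Int)])) (cs.set k (cs.getD k 0 + 1)) hndr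
      have hca0 : u0.contains a0 = true := by simpa using hmem
      refine ⟨by rw [IH1, List.length_set], ?_, ?_, ?_⟩
      · intro j
        rw [IH2 j, pv_getD_set, List.length_set]
        by_cases hjk : j = k ∧ k < cs.length
        · obtain ⟨rfl, hk⟩ := hjk
          simp [hk, List.filter_cons, hca0, hmem]
          push_cast
          omega
        · simp [hjk]
      · intro a x
        rw [IH3 a x, PySem.Dict.getD_modify]
        by_cases haa : a = a0
        · subst haa
          rw [if_pos rfl, List.count_append]
          have har : a ∉ rest := ha0
          by_cases hxk : x = (k : Int)
          · subst hxk
            simp [har, hmem, List.count_cons]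
          · have hkx : ¬((k : Int) = x) := fun h => hxk h.symm
            simp [hxk, hkx, har, hmem, List.count_cons]
        · rw [if_neg haa]
          have hmm : (a ∈ a0 :: rest) ↔ a ∈ rest := by
            constructor
            · intro h
              rcases List.mem_cons.mp h with h | h
              · exact absurd h haa
              · exact h
            · exact fun h => List.mem_cons.mpr (Or.inr h)
          simp [hmm]
      · intro a x hx
        rcases IH4 a x hx with h | h
        · rw [PySem.Dict.getD_modify] at h
          by_cases haa : a = a0
          · rw [if_pos haa] at h
            rcases List.mem_append.mp h with h | h
            · left
              rw [haa]
              exact h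
            · right
              simp at h
              omega
          · rw [if_neg haa] at h
            exact Or.inl h
        · exact Or.inr h
    · rw [if_neg hmem]
      obtain ⟨IH1, IH2, IH3, IH4⟩ := ih d cs hndr
      have hca0 : u0.contains a0 = false := by simpa using hmem
      refine ⟨IH1, ?_, ?_, ?_⟩
      · intro j
        rw [IH2 j]
        simp [List.filter_cons, hca0, hmem]
      · intro a x
        rw [IH3 a x]
        by_cases haa : a = a0
        · subst haa
          simp [hmem]
        · have hmm : (a ∈ a0 :: rest) ↔ a ∈ rest := by
            constructor
            · intro h
              rcases List.mem_cons.mp h with h | h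
              · exact absurd h haa
              · exact h
            · exact fun h => List.mem_cons.mpr (Or.inr h)
          simp [hmm]
      · exact IH4

-- the whole build fold over a list of distinct in-range indices
theorem pv_build_aux (u0 : List String) (sets : List (List String)) :
    ∀ (ks : List Nat) (d : PySem.Dict String (List Int)) (cs : List Int),
    (∀ k ∈ ks, k < cs.length) → ks.Nodup → cs.length = sets.length →
    (∀ k ∈ ks, (sets.getD k []).Nodup) →
    ((ks.foldl (fun st k => (sets.getD k []).foldl (fun st a =>
        if a ∈ u0 then
          (st.1.modify a [] (fun l => l ++ [(k : Int)]), st.2.set k (st.2.getD k 0 + 1))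
        else st) st) (d, cs)).2.length = cs.length) ∧
    (∀ j, (ks.foldl (fun st k => (sets.getD k []).foldl (fun st a =>
        if a ∈ u0 then
          (st.1.modify a [] (fun l => l ++ [(k : Int)]), st.2.set k (st.2.getD k 0 + 1))
        else st) st) (d, cs)).2.getD j 0
      = cs.getD j 0 + if j ∈ ks
          then (((sets.getD j []).filter (fun a => u0.contains a)).length : Int) else 0) ∧
    (∀ a (x : Int), ((ks.foldl (fun st k => (sets.getD k []).foldl (fun st a =>
        if a ∈ u0 then
          (st.1.modify a [] (fun l => l ++ [(k : Int)]), st.2.set k (st.2.getD k 0 + 1))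
        else st) st) (d, cs)).1.getD a []).count x
      = ((d.getD a []).count x)
        + if (∃ k ∈ ks, (k : Int) = x ∧ a ∈ sets.getD k []) ∧ a ∈ u0 then 1 else 0) ∧
    (∀ a (x : Int), x ∈ ((ks.foldl (fun st k => (sets.getD k []).foldl (fun st a =>
        if a ∈ u0 then
          (st.1.modify a [] (fun l => l ++ [(k : Int)]), st.2.set k (st.2.getD k 0 + 1))
        else st) st) (d, cs)).1.getD a []) → x ∈ d.getD a [] ∨ 0 ≤ x) := by
  
  intro ks
  induction ks with
  | nil =>
    intro d cs _ _ _ _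
    exact ⟨rfl, by intro j; simp, by intro a x; simp, fun a x hx => Or.inl hx⟩
  | cons k0 rest ih =>
    intro d cs hrange hnd hlen hsnd
    obtain ⟨hk0r, hndr⟩ := List.nodup_cons.mp hnd
    rw [List.foldl_cons]
    obtain ⟨I1, I2, I3, I4⟩ := pv_build_inner u0 k0 (sets.getD k0 []) d cs (hsnd k0 (by simp))
    rw [← Prod.mk.eta (p := (sets.getD k0 []).foldl _ (d, cs))]
    obtain ⟨J1, J2, J3, J4⟩ := ih ((sets.getD k0 []).foldl _ (d, cs)).1
        ((sets.getD k0 []).foldl _ (d, cs)).2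
        (by intro k hk; rw [I1]; exact hrange k (List.mem_cons.mpr (Or.inr hk)))
        hndr (by rw [I1]; exact hlen)
        (fun k hk => hsnd k (List.mem_cons.mpr (Or.inr hk)))
    refine ⟨by rw [J1, I1], ?_, ?_, ?_⟩
    · intro j
      rw [J2 j, I2 j]
      by_cases hj0 : j = k0
      · subst hj0
        have hjlt : j < cs.length := hrange j (by simp)
        have hjr : j ∉ rest := hk0r
        simp [hjlt, hjr]
      · have hmm : (j ∈ k0 :: rest) ↔ j ∈ rest := by
          constructor
          · intro h
            rcases List.mem_cons.mp h with h | h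
            · exact absurd h hj0
            · exact h
          · exact fun h => List.mem_cons.mpr (Or.inr h)
        simp [hj0, hmm]
    · intro a x
      rw [J3 a x, I3 a x]
      by_cases hau : a ∈ u0
      · by_cases h1 : x = (k0 : Int) ∧ a ∈ sets.getD k0 []
        · obtain ⟨hx0, ha1⟩ := h1
          have h2 : ¬ (∃ k ∈ rest, (k : Int) = x ∧ a ∈ sets.getD k []) := by
            rintro ⟨k, hk, hkx, -⟩
            have hkk : k = k0 := by
              have := hkx.trans hx0
              exact_mod_cast this
            exact hk0r (hkk ▸ hk)
          subst hx0
          have h3 : ∃ k ∈ k0 :: rest, (k : Int) = ((k0 : Nat) : Int) ∧ a ∈ sets.getD k [] :=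
            ⟨k0, by simp, rfl, ha1⟩
          rw [if_pos ⟨rfl, ha1, hau⟩, if_neg (fun hh => h2 hh.1), if_pos ⟨h3, hau⟩]
        · have h4 : (∃ k ∈ k0 :: rest, (k : Int) = x ∧ a ∈ sets.getD k [])
              ↔ (∃ k ∈ rest, (k : Int) = x ∧ a ∈ sets.getD k []) := by
            constructor
            · rintro ⟨k, hk, hkx, hka⟩
              rcases List.mem_cons.mp hk with rfl | hk'
              · exact absurd ⟨hkx.symm, hka⟩ h1
              · exact ⟨k, hk', hkx, hka⟩
            · rintro ⟨k, hk, hkx, hka⟩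
              exact ⟨k, List.mem_cons.mpr (Or.inr hk), hkx, hka⟩
          have h5 : ¬(x = (k0 : Int) ∧ a ∈ sets.getD k0 [] ∧ a ∈ u0) := by
            rintro ⟨hx, hh, -⟩
            exact h1 ⟨hx, hh⟩
          simp only [h4, h5, if_false]
          split_ifs <;> omega
      · have h6 : ∀ (P : Prop), ¬(P ∧ a ∈ u0) := fun P h => hau h.2
        have h7 : ¬(x = (k0 : Int) ∧ a ∈ sets.getD k0 [] ∧ a ∈ u0) := by
          rintro ⟨-, -, h⟩
          exact hau h
        simp [h6, h7]
    · intro a x hx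
      rcases J4 a x hx with h | h
      · exact I4 a x h
      · exact Or.inr h

-- characterization of pvBuild
theorem pv_build_spec (u0 : List String) (sets : List (List String))
    (hnd : ∀ s ∈ sets, s.Nodup) :
    (pvBuild sets u0).2.length = sets.length ∧
    (∀ j, j < sets.length → (pvBuild sets u0).2.getD j 0
        = (((sets.getD j []).filter (fun a => u0.contains a)).length : Int)) ∧
    (∀ a (j : Nat), j < sets.length → (((pvBuild sets u0).1.getD a []).count ((j : Int)))
        = if a ∈ sets.getD j [] ∧ a ∈ u0 then 1 else 0) ∧
    (∀ a (x : Int), x ∈ (pvBuild sets u0).1.getD a [] → 0 ≤ x) := by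
  
  have key : pvBuild sets u0 = (List.range sets.length).foldl
      (fun st k => (sets.getD k []).foldl (fun st a =>
        if a ∈ u0 then
          (st.1.modify a [] (fun l => l ++ [(k : Int)]), st.2.set k (st.2.getD k 0 + 1))
        else st) st)
      (PySem.Dict.empty, List.replicate sets.length 0) := by
    unfold pvBuild
    rw [pv_enum_eq ([] : List String) sets 0, List.foldl_map]
    simp only [zero_add, Int.toNat_natCast]
  have hmemset : ∀ k, k < sets.length → sets.getD k [] ∈ sets := by
    intro k hk
    rw [List.getD_eq_getElem?_getD, List.getElem?_eq_getElem hk]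
    exact List.getElem_mem hk
  obtain ⟨A1, A2, A3, A4⟩ := pv_build_aux u0 sets (List.range sets.length)
      PySem.Dict.empty (List.replicate sets.length 0)
      (by intro k hk; simpa using List.mem_range.mp hk)
      List.nodup_range (by simp)
      (fun k hk => hnd _ (hmemset k (List.mem_range.mp hk)))
  rw [key]
  refine ⟨by rw [A1]; simp, ?_, ?_, ?_⟩
  · intro j hj
    rw [A2 j]
    have hz : (List.replicate sets.length (0 : Int)).getD j 0 = 0 := by
      simp [List.getD_eq_getElem?_getD, List.getElem?_replicate, hj]
    simp [hz, List.mem_range, hj]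
  · intro a j hj
    rw [A3 a ((j : Int))]
    have hex : (∃ k ∈ List.range sets.length, (k : Int) = ((j : Nat) : Int) ∧ a ∈ sets.getD k [])
        ↔ (a ∈ sets.getD j []) := by
      constructor
      · rintro ⟨k, _, hkj, hka⟩
        have : k = j := by exact_mod_cast hkj
        rwa [this] at hka
      · intro h
        exact ⟨j, List.mem_range.mpr hj, rfl, h⟩
    simp [PySem.Dict.getD_empty, hex]
    simp [hj]
  · intro a x hx
    rcases A4 a x hx with h | h
    · rw [PySem.Dict.getD_empty] at h
      exact absurd h (List.not_mem_nil)
    · exact h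

-- decrementing along an index list subtracts the multiplicity
theorem pv_dec_fold (L : List Int) (hL : ∀ x ∈ L, 0 ≤ x) : ∀ (cs : List Int),
    ((L.foldl (fun cs i => cs.set i.toNat (cs.getD i.toNat 0 - 1)) cs).length = cs.length) ∧
    (∀ j : Nat, j < cs.length →
      (L.foldl (fun cs i => cs.set i.toNat (cs.getD i.toNat 0 - 1)) cs).getD j 0
        = cs.getD j 0 - L.count ((j : Int))) := by
  
  induction L with
  | nil => intro cs; simp
  | cons i rest ih =>
    intro cs
    have hi : 0 ≤ i := hL i (by simp)
    have hrest : ∀ x ∈ rest, 0 ≤ x := fun x hx => hL x (by simp [hx])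
    have ih' := ih hrest (cs.set i.toNat (cs.getD i.toNat 0 - 1))
    rw [List.foldl_cons]
    refine ⟨by rw [ih'.1]; simp, ?_⟩
    intro j hj
    rw [ih'.2 j (by simpa using hj)]
    have hset : ∀ (m : Nat) (v : Int), (cs.set m v).getD j 0
        = if m = j ∧ m < cs.length then v else cs.getD j 0 := by
      intro m v
      rw [List.getD_eq_getElem?_getD, List.getElem?_set, List.getD_eq_getElem?_getD]
      by_cases hmj : m = j
      · subst hmj
        simp [hj]
      · simp [hmj]
    rw [hset]
    by_cases hij : i = (j : Int)
    · have : i.toNat = j := by omega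
      rw [if_pos ⟨this, by omega⟩, this]
      simp [hij, List.count_cons]
      omega
    · have : i.toNat ≠ j := by omega
      rw [if_neg (by tauto)]
      have : (i == (j : Int)) = false := by simpa using hij
      simp [List.count_cons, this]

-- removing one covered ability drops the intersection size by one where it occurs
theorem pv_filter_sub (a : String) (u : List String) (ha : a ∈ u) :
    ∀ (s : List String), s.Nodup →
    ((s.filter (fun y => u.contains y && !(y == a))).length : Int)
      = ((s.filter (fun y => u.contains y)).length : Int) - (if a ∈ s then 1 else 0) := by
  intro s
  induction s with
  | nil => intro _; simp
  | cons y t ih =>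
    intro hnd
    obtain ⟨hy', hndt⟩ := List.nodup_cons.mp hnd
    have iht := ih hndt
    by_cases hy : y = a
    · subst hy
      have h2 : u.contains y = true := by simpa using ha
      simp only [List.filter_cons, h2, beq_self_eq_true, Bool.not_true, Bool.and_false,
        Bool.false_eq_true, if_false, if_true, List.length_cons]
      rw [if_pos List.mem_cons_self]
      rw [if_neg hy'] at iht
      push_cast at iht ⊢
      omega
    · have h3 : (y == a) = false := by simp [hy]
      have h4 : (a ∈ y :: t) ↔ a ∈ t := by
        constructor
        · intro h
          rcases List.mem_cons.mp h with h | h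
          · exact absurd h.symm hy
          · exact h
        · exact fun h => List.mem_cons.mpr (Or.inr h)
      rw [if_congr h4 rfl rfl]
      simp only [List.filter_cons, h3, Bool.not_false, Bool.and_true]
      cases hcy : u.contains y
      · simp only [Bool.false_eq_true, if_false]
        exact iht
      · simp only [if_true, List.length_cons]
        push_cast at iht ⊢
        omega

theorem pv_remove_spec (index : PySem.Dict String (List Int)) (sets : List (List String))
    (u0 : List String)
    (hpos : ∀ a (x : Int), x ∈ index.getD a [] → 0 ≤ x)
    (hcnt : ∀ a (j : Nat), j < sets.length →
      ((index.getD a []).count ((j : Int))) = if a ∈ sets.getD j [] ∧ a ∈ u0 then 1 else 0)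
    (hsnd : ∀ j, j < sets.length → (sets.getD j []).Nodup) :
    ∀ (l : List String) (u : List String) (cs : List Int),
    u.Nodup → (∀ a ∈ u, a ∈ u0) → cs.length = sets.length →
    (∀ j, j < sets.length → cs.getD j 0
        = (((sets.getD j []).filter (fun a => u.contains a)).length : Int)) →
    (pvRemove index l (u, cs)).1 = u.filter (fun a => !(l.contains a)) ∧
    (pvRemove index l (u, cs)).2.length = sets.length ∧
    (∀ j, j < sets.length → (pvRemove index l (u, cs)).2.getD j 0
        = (((sets.getD j []).filter
            (fun a => (u.filter (fun b => !(l.contains b))).contains a)).length : Int)) := by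
  
  intro l
  induction l with
  | nil =>
    intro u cs hnd hsub hlen hchar
    have hfu : u.filter (fun b => !(List.contains ([] : List String) b)) = u := by simp
    refine ⟨?_, ?_, ?_⟩
    · show u = _
      rw [hfu]
    · exact hlen
    · intro j hj
      show cs.getD j 0 = _
      rw [hfu]
      exact hchar j hj
  | cons a0 rest ih =>
    intro u cs hnd hsub hlen hchar
    have hstep : pvRemove index (a0 :: rest) (u, cs) = pvRemove index rest
        (if a0 ∈ u then (PySem.Set.discard u a0,
          (index.getD a0 []).foldl (fun cs i => cs.set i.toNat (cs.getD i.toNat 0 - 1)) cs)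
         else (u, cs)) := rfl
    by_cases hm : a0 ∈ u
    · rw [hstep, if_pos hm]
      have hau0 : a0 ∈ u0 := hsub a0 hm
      have hdec := pv_dec_fold (index.getD a0 []) (fun x hx => hpos a0 x hx) cs
      have hchar1 : ∀ j, j < sets.length →
          ((index.getD a0 []).foldl (fun cs i => cs.set i.toNat (cs.getD i.toNat 0 - 1)) cs).getD j 0
            = (((sets.getD j []).filter
                (fun a => (PySem.Set.discard u a0).contains a)).length : Int) := by
        intro j hj
        rw [hdec.2 j (by rw [hlen]; exact hj), hchar j hj, hcnt a0 j hj]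
        have hfs := pv_filter_sub a0 u hm (sets.getD j []) (hsnd j hj)
        have hpred : ((sets.getD j []).filter (fun y => (PySem.Set.discard u a0).contains y))
            = ((sets.getD j []).filter (fun y => u.contains y && !(y == a0))) := by
          apply List.filter_congr
          intro y _
          exact pv_contains_discard a0 y u
        rw [hpred, hfs]
        simp [hau0]
      have hnd1 : (PySem.Set.discard u a0).Nodup := hnd.filter _
      have hsub1 : ∀ a ∈ PySem.Set.discard u a0, a ∈ u0 := by
        intro a hax
        exact hsub a (List.mem_of_mem_filter hax)
      obtain ⟨R1, R2, R3⟩ := ih (PySem.Set.discard u a0) _ hnd1 hsub1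
        (by rw [hdec.1]; exact hlen) hchar1
      have hfilter2 : (PySem.Set.discard u a0).filter (fun b => !(rest.contains b))
          = u.filter (fun b => !((a0 :: rest).contains b)) := by
        rw [show PySem.Set.discard u a0 = u.filter (fun y => !(y == a0)) from rfl,
          List.filter_filter]
        apply List.filter_congr
        intro y _
        have hbd : (y == a0) = decide (y = a0) := by by_cases h : y = a0 <;> simp [h]
        simp [List.mem_cons, Bool.not_or, Bool.and_comm, hbd]
      refine ⟨?_, R2, ?_⟩
      · rw [R1, hfilter2]
      · intro j hj
        rw [R3 j hj, hfilter2]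
    · rw [hstep, if_neg hm]
      obtain ⟨R1, R2, R3⟩ := ih u cs hnd hsub hlen hchar
      have hf : u.filter (fun b => !(rest.contains b))
          = u.filter (fun b => !((a0 :: rest).contains b)) := by
        apply List.filter_congr
        intro y hy
        have hya : decide (y = a0) = false := by
          simp only [decide_eq_false_iff_not]
          rintro rfl
          exact hm hy
        simp [List.mem_cons, Bool.not_or, hya]
      exact ⟨by rw [R1, hf], R2, by intro j hj; rw [R3 j hj, hf]⟩

-- the two loops agree step by step
theorem pv_loop_eq (players : List (List (String × List String)))
    (sets : List (List String)) (index : PySem.Dict String (List Int)) (u0 : List String)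
    (hsets : sets = players.map pvAbil) (hne : players ≠ [])
    (hpos : ∀ a (x : Int), x ∈ index.getD a [] → 0 ≤ x)
    (hcnt : ∀ a (j : Nat), j < sets.length →
      ((index.getD a []).count ((j : Int))) = if a ∈ sets.getD j [] ∧ a ∈ u0 then 1 else 0) :
    ∀ (n : Nat) (u : List String) (cs : List Int),
    u.Nodup → (∀ a ∈ u, a ∈ u0) → cs.length = sets.length →
    (∀ j, j < sets.length → cs.getD j 0
        = (((sets.getD j []).filter (fun a => u.contains a)).length : Int)) →
    pvALoop players n u = pvBLoop players sets index n u cs := by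
  
  intro n
  induction n with
  | zero => intro u cs _ _ _ _; rfl
  | succ n ihn =>
    intro u cs hnd hsub hlen hchar
    cases hUe : u.isEmpty with
    | true => simp [pvALoop, pvBLoop, hUe]
    | false =>
      simp only [pvALoop, pvBLoop, hUe, Bool.false_eq_true, if_false]
      have hplen : sets.length = players.length := by rw [hsets]; simp
      have hc : ∀ k, k < players.length →
          cs.getD k 0 = (pvAKey u (players.getD k []) : Int) := by
        intro k hk
        have hk' : k < sets.length := by rw [hplen]; exact hk
        rw [hchar k hk']
        have hsk : sets.getD k [] = pvAbil (players.getD k []) := by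
          rw [hsets]
          exact pv_getD_map pvAbil players k hk [] []
        rw [hsk]
        simp [pvAKey, PySem.Set.inter]
      obtain ⟨hb, hbp⟩ := pv_argmax_spec u players cs hne (by rw [hlen, hplen]) hc
      have hsetsb : sets.getD (pvArgmax cs) [] = pvAbil (pvAMax players u) := by
        rw [hsets, pv_getD_map pvAbil players _ hb [] [], hbp]
      have hsnd : ∀ j, j < sets.length → (sets.getD j []).Nodup := by
        intro j hj
        have hj' : j < players.length := by rw [← hplen]; exact hj
        rw [hsets, pv_getD_map pvAbil players j hj' [] []]
        unfold pvAbil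
        exact PySem.Set.nodup_ofList _
      obtain ⟨R1, R2, R3⟩ := pv_remove_spec index sets u0 hpos hcnt hsnd
        (sets.getD (pvArgmax cs) []) u cs hnd hsub hlen hchar
      have hdiff : PySem.Set.diff u (pvAbil (pvAMax players u))
          = (pvRemove index (sets.getD (pvArgmax cs) []) (u, cs)).1 := by
        rw [R1, hsetsb]
        rfl
      refine congrArg₂ List.cons hbp.symm ?_
      rw [hdiff]
      apply ihn
      · rw [R1]
        exact hnd.filter _
      · rw [R1]
        intro a hax
        exact hsub a (List.mem_of_mem_filter hax)
      · exact R2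
      · intro j hj
        rw [R3 j hj, ← R1]

-- ===== VERDICT (by name: the statement is the Claim_ definition above) =====
theorem select_players_spec : Claim_equal_select_players := by
  intro players abilities team_size _ hpre
  show select_players players abilities team_size = select_players_alt players abilities team_size
  unfold select_players select_players_alt
  by_cases h1 : 0 < team_size
  · by_cases h2 : PySem.Set.ofList abilities = []
    · rw [if_neg (by rintro ⟨-, h⟩; exact h h2), h2]
      cases h : team_size.toNat <;> simp [pvALoop]
    · rw [if_pos ⟨h1, h2⟩]
      have hne : players ≠ [] := by
        rcases hpre with hts | hab | ⟨hne, -⟩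
        · omega
        · exact absurd (by rw [hab]; rfl) h2
        · exact hne
      have hnd : ∀ s ∈ players.map pvAbil, s.Nodup := by
        intro s hs
        rcases List.mem_map.mp hs with ⟨p, -, rfl⟩
        unfold pvAbil
        exact PySem.Set.nodup_ofList _
      obtain ⟨B1, B2, B3, B4⟩ :=
        pv_build_spec (PySem.Set.ofList abilities) (players.map pvAbil) hnd
      exact pv_loop_eq players (players.map pvAbil)
        (pvBuild (players.map pvAbil) (PySem.Set.ofList abilities)).1
        (PySem.Set.ofList abilities) rfl hne B4 B3 team_size.toNat
        (PySem.Set.ofList abilities)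
        (pvBuild (players.map pvAbil) (PySem.Set.ofList abilities)).2
        (PySem.Set.nodup_ofList abilities) (fun a ha => ha) B1 B2
  · rw [if_neg (by rintro ⟨h, -⟩; exact h1 h), Int.toNat_of_nonpos (by omega)]
    rfl
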